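-- pv_equiv track=rewrite | github.com/Radcliffe/OEIS-Python | src/oeispy/A090/A090946.py | A090946
-- ===== SOURCE A (Python) =====
-- def A090946(n):
--     if n == 1: return 0
--     def f(x):
--         if x<=2: return n
--         a, b, c = 1, 3, 0
--         while b<=x:
--             a, b = b, a+b
--             c += 1
--         return n+c
--     m, k = n, f(n)
--     while m != k: m, k = k, f(k)
--     return m # _Chai Wah Wu_, Sep 10 2024
-- ===== SOURCE B (Python) =====
-- def A090946(n):
--     if n == 1:
--         return 0
--     if n <= 2:
--         return n
--     # Least-fixed-point by one greedy scan of the Fibonacci-like sequence (3, 4, then sums):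
--     # the answer is n+c for the least c>=0 with (#terms <= n+c) == c, and that c
--     # is found by admitting each successive term t while t <= n+c.
--     c, a, b = 0, 3, 4
--     while a <= n + c:
--         c, a, b = c + 1, b, a + b
--     return n + c
-- ===== Notes on version B (the rewrite author's own statement) =====
-- stated objective: simpler
-- what changed: B drops the fixed-point iteration m,k=k,f(k) entirely: instead of repeatedly applying the counting map f until it stabilizes, it computes the least fixed point directly with one greedy scan of the Fibonacci-like sequence (start 3 and 4, each further term the sum of the previous two), admitting each term t while t <= n+c and returning n+c.
import Mathlib
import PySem

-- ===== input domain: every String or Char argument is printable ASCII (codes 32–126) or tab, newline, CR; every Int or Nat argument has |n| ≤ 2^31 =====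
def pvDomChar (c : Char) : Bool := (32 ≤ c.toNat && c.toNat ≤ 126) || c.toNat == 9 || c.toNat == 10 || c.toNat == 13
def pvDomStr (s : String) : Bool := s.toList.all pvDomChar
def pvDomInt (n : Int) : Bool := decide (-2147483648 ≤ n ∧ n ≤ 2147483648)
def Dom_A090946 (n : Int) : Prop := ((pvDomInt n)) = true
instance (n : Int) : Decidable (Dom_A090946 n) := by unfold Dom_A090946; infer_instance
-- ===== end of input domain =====

-- B replaces A's fixed-point iteration of the counting map f by a single greedy scan of the
-- Fibonacci-like sequence (start 3 and 4, each next term the sum of the previous two) that computes the least fixed point directly (objective: simpler).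

-- ===== PORT A =====
-- inner `while b<=x: a,b=b,a+b; c+=1`; fuel is only a totality guard (x.toNat+2 steps always suffice)
def loopA (fuel : Nat) (x a b c : Int) : Int :=
  match fuel with
  | 0 => c
  | fuel+1 => if b ≤ x then loopA fuel x b (a+b) (c+1) else c

def fA (n x : Int) : Int := if x ≤ 2 then n else n + loopA (x.toNat + 2) x 1 3 0

-- outer `while m != k: m, k = k, f(k)`; fuel is only a totality guard
def outerA (fuel : Nat) (n m k : Int) : Int :=
  match fuel with
  | 0 => m
  | fuel+1 => if m = k then m else outerA fuel n k (fA n k)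

def A090946 (n : Int) : Int :=
  if n = 1 then 0 else outerA (n.toNat + 2) n n (fA n n)

-- ===== PORT B =====
-- `c, a, b = 0, 3, 4; while a <= n + c: c, a, b = c+1, b, a+b; return n+c`; fuel = totality guard
def loopB (fuel : Nat) (n c a b : Int) : Int :=
  match fuel with
  | 0 => n + c
  | fuel+1 => if a ≤ n + c then loopB fuel n (c+1) b (a+b) else n + c

def A090946_alt (n : Int) : Int :=
  if n = 1 then 0
  else if n ≤ 2 then n
  else loopB (n.toNat + 2) n 0 3 4

-- ===== PRECONDITION & SPEC =====
def Spec_A090946 (n : Int) (out : Int) : Prop := out = A090946_alt n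
instance (n : Int) (out : Int) : Decidable (Spec_A090946 n out) := by unfold Spec_A090946; infer_instance

-- ===== CLAIM (what is proved, stated in full; the proofs are below) =====
def Claim_equal_A090946 : Prop := ∀ (n : Int), Dom_A090946 n → Spec_A090946 n (A090946 n)

-- ===== LEMMAS AND PROOFS =====

-- number of terms of the sequence a, b, a+b, ... that are ≤ x (guards 3 ≤ a < b are invariants
-- of all reachable states and make the recursion total)
def ccount (x a b : Int) : Int :=
  if _h : a ≤ x ∧ 3 ≤ a ∧ a < b then 1 + ccount x b (a+b) else 0
termination_by (x + 1 - a).toNat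
decreasing_by omega

-- the greedy loop as a well-founded recursion (guards = reachable-state invariants)
def bfix (n c a b : Int) : Int :=
  if _h : a ≤ n + c ∧ 3 ≤ a ∧ a + 3 ≤ b then bfix n (c+1) b (a+b) else n + c
termination_by (n + c + 2 - a).toNat
decreasing_by omega

lemma ccount_nonneg (x a b : Int) : 0 ≤ ccount x a b := by
  induction a, b using ccount.induct x with
  | case1 a b h ih => rw [ccount, dif_pos h]; omega
  | case2 a b h => rw [ccount, dif_neg h]

lemma ccount_mono (x y a b : Int) (hxy : x ≤ y) (ha : 3 ≤ a) (hb : a < b) :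
    ccount x a b ≤ ccount y a b := by
  induction a, b using ccount.induct y with
  | case1 a b h ih =>
      have hy : ccount y a b = 1 + ccount y b (a+b) := by rw [ccount, dif_pos h]
      by_cases hax : a ≤ x
      · have hx : ccount x a b = 1 + ccount x b (a+b) := by
          rw [ccount, dif_pos ⟨hax, h.2⟩]
        have := ih (by omega) (by omega)
        omega
      · have hx : ccount x a b = 0 := by rw [ccount, dif_neg (fun hh => hax hh.1)]
        have := ccount_nonneg y b (a+b)
        omega
  | case2 a b h =>
      have hy : ccount y a b = 0 := by rw [ccount, dif_neg h]
      have hx : ccount x a b = 0 := by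
        rw [ccount, dif_neg (fun hh => h ⟨le_trans hh.1 hxy, ha, hb⟩)]
      omega

-- A's inner loop computes ccount
lemma loopA_eq_ccount (fuel : Nat) (x a b c : Int) (ha : 1 ≤ a) (hb : 3 ≤ b)
    (hf : (x + 1 - b).toNat ≤ fuel) :
    loopA fuel x a b c = c + ccount x b (a+b) := by
  induction fuel generalizing a b c with
  | zero =>
      have hbx : ¬ b ≤ x := by omega
      rw [loopA, ccount, dif_neg (by omega)]
      omega
  | succ f ih =>
      by_cases hbx : b ≤ x
      · rw [loopA, if_pos hbx, ccount, dif_pos ⟨hbx, by omega, by omega⟩,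
          ih b (a+b) (c+1) (by omega) (by omega) (by omega)]
        ring
      · rw [loopA, if_neg hbx, ccount, dif_neg (by omega)]
        omega

lemma fA_eq (n x : Int) (hx : 3 ≤ x) : fA n x = n + ccount x 3 4 := by
  rw [fA, if_neg (by omega),
    loopA_eq_ccount (x.toNat + 2) x 1 3 0 (by omega) (by omega) (by omega)]
  norm_num

lemma fA_ge (n x : Int) : n ≤ fA n x := by
  by_cases hx : x ≤ 2
  · rw [fA, if_pos hx]
  · rw [fA_eq n x (by omega)]
    have := ccount_nonneg x 3 4
    omega

lemma fA_mono (n x y : Int) (hxy : x ≤ y) : fA n x ≤ fA n y := by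
  by_cases hx : x ≤ 2
  · rw [fA, if_pos hx]; exact fA_ge n y
  · rw [fA_eq n x (by omega), fA_eq n y (by omega)]
    have := ccount_mono x y 3 4 hxy (by omega) (by omega)
    omega

-- B's port computes bfix on states satisfying the invariant
lemma loopB_eq_bfix (fuel : Nat) (n c a b : Int) (ha : 3 ≤ a) (hb : a + 3 ≤ b)
    (hf : (n + c + 2 - a).toNat ≤ fuel) :
    loopB fuel n c a b = bfix n c a b := by
  induction fuel generalizing c a b with
  | zero =>
      rw [loopB, bfix, dif_neg (by omega)]
  | succ f ih =>
      by_cases hg : a ≤ n + c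
      · rw [loopB, if_pos hg, bfix, dif_pos ⟨hg, ha, hb⟩,
          ih (c+1) b (a+b) (by omega) (by omega) (by omega)]
      · rw [loopB, if_neg hg, bfix, dif_neg (by omega)]

-- KEY: the greedy result r = bfix n c a b satisfies c ≤ r - n, the remaining count from the
-- current state is exactly r - n - c, and no m with n+c ≤ m < r has remaining count m - n - c.
lemma bfix_key (n c a b : Int) (ha : 3 ≤ a) (hb : a + 3 ≤ b) :
    c ≤ bfix n c a b - n ∧
    ccount (bfix n c a b) a b = bfix n c a b - n - c ∧
    (∀ m, n + c ≤ m → m < bfix n c a b → ccount m a b ≠ m - n - c) := by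
  induction c, a, b using bfix.induct n with
  | case1 c a b h ih =>
      obtain ⟨hg, ha', hb'⟩ := h
      have heq : bfix n c a b = bfix n (c+1) b (a+b) := by
        rw [bfix, dif_pos ⟨hg, ha', hb'⟩]
      obtain ⟨ih1, ih2, ih3⟩ := ih (by omega) (by omega)
      rw [heq]
      refine ⟨by omega, ?_, ?_⟩
      · have hc1 : ccount (bfix n (c+1) b (a+b)) a b
            = 1 + ccount (bfix n (c+1) b (a+b)) b (a+b) := by
          rw [ccount, dif_pos ⟨by omega, by omega, by omega⟩]
        omega
      · intro m hm1 hm2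
        by_cases ham : a ≤ m
        · have hcm : ccount m a b = 1 + ccount m b (a+b) := by
            rw [ccount, dif_pos ⟨ham, by omega, by omega⟩]
          by_cases hmc : m = n + c
          · have := ccount_nonneg m b (a+b)
            omega
          · have := ih3 m (by omega) hm2
            omega
        · have hcm : ccount m a b = 0 := by rw [ccount, dif_neg (fun hh => ham hh.1)]
          omega
  | case2 c a b h =>
      have heq : bfix n c a b = n + c := by rw [bfix, dif_neg h]
      have hg : ¬ a ≤ n + c := fun hh => h ⟨hh, ha, hb⟩
      rw [heq]
      refine ⟨by omega, ?_, ?_⟩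
      · rw [ccount, dif_neg (fun hh => hg (by omega))]
        omega
      · intro m hm1 hm2
        omega

-- linear size bound on the greedy result, used only for fuel adequacy
lemma bfix_bound (n c a b : Int) (ha : 3 ≤ a) (hb : a + 3 ≤ b) (hc : 2*c + 2 ≤ a) :
    bfix n c a b - n ≤ max c (n - 1) := by
  induction c, a, b using bfix.induct n with
  | case1 c a b h ih =>
      obtain ⟨hg, ha', hb'⟩ := h
      have heq : bfix n c a b = bfix n (c+1) b (a+b) := by
        rw [bfix, dif_pos ⟨hg, ha', hb'⟩]
      have ih' := ih (by omega) (by omega) (by omega)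
      rw [heq]
      omega
  | case2 c a b h =>
      have heq : bfix n c a b = n + c := by rw [bfix, dif_neg h]
      rw [heq]
      omega

-- for n ≥ 3 the greedy answer r = bfix n 1 4 7 is a fixed point of f …
lemma fA_fix (n : Int) (hn : 3 ≤ n) : fA n (bfix n 1 4 7) = bfix n 1 4 7 := by
  obtain ⟨h1, h2, _⟩ := bfix_key n 1 4 7 (by omega) (by omega)
  have hr : 3 ≤ bfix n 1 4 7 := by omega
  rw [fA_eq n _ hr, ccount, dif_pos ⟨by omega, by omega, by omega⟩]
  norm_num
  omega

-- … and the least one ≥ n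
lemma fA_min (n m : Int) (hn : 3 ≤ n) (hm1 : n ≤ m) (hm2 : m < bfix n 1 4 7) :
    fA n m ≠ m := by
  obtain ⟨h1, h2, h3⟩ := bfix_key n 1 4 7 (by omega) (by omega)
  rw [fA_eq n m (by omega), ccount, dif_pos ⟨by omega, by omega, by omega⟩]
  norm_num
  by_cases hmn : m = n
  · have := ccount_nonneg m 4 7
    omega
  · have := h3 m (by omega) hm2
    omega

-- A's outer fixed-point iteration reaches the greedy answer
lemma outer_reaches (n : Int) (hn : 3 ≤ n) :
    ∀ (fuel : Nat) (m : Int), n ≤ m → m ≤ bfix n 1 4 7 → m ≤ fA n m →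
      ((bfix n 1 4 7) - m).toNat < fuel → outerA fuel n m (fA n m) = bfix n 1 4 7 := by
  intro fuel
  induction fuel with
  | zero => intro m _ _ _ hf; omega
  | succ f ih =>
      intro m hm1 hm2 hm3 hf
      rw [outerA]
      by_cases hfix : m = fA n m
      · rw [if_pos hfix]
        by_cases hlt : m < bfix n 1 4 7
        · exact absurd hfix.symm (fA_min n m hn hm1 hlt)
        · omega
      · rw [if_neg hfix]
        have hk1 : m < fA n m := by omega
        have hk2 : fA n m ≤ bfix n 1 4 7 := by
          have := fA_mono n m _ hm2
          rw [fA_fix n hn] at this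
          exact this
        exact ih (fA n m) (le_trans hm1 (le_of_lt hk1)) hk2
          (fA_mono n m (fA n m) (le_of_lt hk1)) (by omega)

-- ===== VERDICT (by name: the statement is the Claim_ definition above) =====
theorem A090946_spec : Claim_equal_A090946 := by
  intro n _
  unfold Spec_A090946 A090946 A090946_alt
  by_cases h1 : n = 1
  · simp [h1]
  · rw [if_neg h1, if_neg h1]
    by_cases h2 : n ≤ 2
    · rw [if_pos h2]
      have hfa : fA n n = n := by rw [fA, if_pos h2]
      rw [hfa]
      cases h : n.toNat + 2 with
      | zero => rfl
      | succ f => rw [outerA, if_pos rfl]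
    · rw [if_neg h2]
      have hn : 3 ≤ n := by omega
      -- B side: unroll the first greedy step, then identify with bfix
      have hB : loopB (n.toNat + 2) n 0 3 4 = bfix n 1 4 7 := by
        have : n.toNat + 2 = (n.toNat + 1) + 1 := by omega
        rw [this, loopB, if_pos (by omega)]
        exact loopB_eq_bfix (n.toNat + 1) n 1 4 7 (by omega) (by omega) (by omega)
      rw [hB]
      -- A side: the iteration reaches bfix n 1 4 7
      have hb := bfix_bound n 1 4 7 (by omega) (by omega) (by omega)
      obtain ⟨hge, _, _⟩ := bfix_key n 1 4 7 (by omega) (by omega)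
      exact outer_reaches n hn (n.toNat + 2) n (le_refl n) (by omega) (fA_ge n n) (by omega)
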